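-- pv_equiv track=rewrite | github.com/MitsuhiroTaniguchi/MahjongLM | src/tenhou_tokenizer/engine.py | _is_kokushi_agari_shape
-- ===== SOURCE A (Python) =====
-- from typing import Dict, Iterable, List, Optional, Set, Tuple
--
-- YAOCHU_INDICES: Set[int] = {0, 8, 9, 17, 18, 26, *range(27, 34)}
--
-- def _is_kokushi_agari_shape(counts: List[int], meld_count: int) -> bool:
--     if meld_count != 0:
--         return False
--     if sum(counts) != 14:
--         return False
--     pair_found = False
--     for i, c in enumerate(counts):
--         if i in YAOCHU_INDICES:
--             if c == 0:
--                 return False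
--             if c == 1:
--                 continue
--             if c == 2 and not pair_found:
--                 pair_found = True
--                 continue
--             return False
--         if c != 0:
--             return False
--     return pair_found
-- ===== SOURCE B (Python) =====
-- YAOCHU_INDICES = {0, 8, 9, 17, 18, 26, *range(27, 34)}
--
-- def _is_kokushi_agari_shape(counts, meld_count):
--     # There are exactly 13 kokushi winning hands: one terminal/honor doubled,
--     # the other twelve single.  Enumerate them and compare directly.
--     if meld_count != 0:
--         return False
--     return any(
--         counts[:34] == [2 if i == pair else (1 if i in YAOCHU_INDICES else 0)
--                         for i in range(34)]
--         and all(c == 0 for c in counts[34:])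
--         for pair in YAOCHU_INDICES)
-- ===== Notes on version B (the rewrite author's own statement) =====
-- stated objective: alternative
-- what changed: Replaces A's single classify-and-validate scan with a pair flag by direct table lookup: there are exactly 13 kokushi winning hands (each yaochu index doubled once), so B generates each candidate vector and compares counts against it (plus trailing zeros).
import Mathlib
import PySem

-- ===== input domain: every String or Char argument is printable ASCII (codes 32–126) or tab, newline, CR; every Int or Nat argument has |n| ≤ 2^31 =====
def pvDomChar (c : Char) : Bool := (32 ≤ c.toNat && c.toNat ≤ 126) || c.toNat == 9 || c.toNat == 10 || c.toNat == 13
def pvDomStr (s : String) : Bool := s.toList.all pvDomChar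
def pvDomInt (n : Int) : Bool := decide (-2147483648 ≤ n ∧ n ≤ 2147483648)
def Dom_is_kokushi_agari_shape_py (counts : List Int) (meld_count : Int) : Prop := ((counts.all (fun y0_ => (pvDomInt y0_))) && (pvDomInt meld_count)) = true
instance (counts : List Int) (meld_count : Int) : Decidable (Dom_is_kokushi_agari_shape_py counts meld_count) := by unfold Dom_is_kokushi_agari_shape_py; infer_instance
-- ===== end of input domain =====

-- B replaces A's single classify-and-validate scan (with a pair flag) by direct table lookup:
-- there are exactly 13 kokushi winning hands (each yaochu tile doubled once), so B generates each
-- candidate vector and compares counts against it; objective: alternative algorithm, same cost.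

-- module constant YAOCHU_INDICES = {0, 8, 9, 17, 18, 26, *range(27, 34)} (shared by A and B)
def yaochuIndices : List Int := [0, 8, 9, 17, 18, 26, 27, 28, 29, 30, 31, 32, 33]

-- ===== PORT A =====
-- the for-loop over enumerate(counts) with its pair_found flag and early returns
def kokushiLoop : List (Int × Int) → Bool → Bool
  | [], pair_found => pair_found
  | (i, c) :: rest, pair_found =>
    if i ∈ yaochuIndices then
      if c = 0 then false
      else if c = 1 then kokushiLoop rest pair_found
      else if c = 2 ∧ pair_found = false then kokushiLoop rest true
      else false
    else if c ≠ 0 then false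
    else kokushiLoop rest pair_found

def is_kokushi_agari_shape_py (counts : List Int) (meld_count : Int) : Bool :=
  if meld_count ≠ 0 then false
  else if counts.sum ≠ 14 then false
  else kokushiLoop (PySem.List.enumerate counts) false

-- ===== PORT B =====
-- the candidate hand with the pair on index p:
--   [2 if i == pair else (1 if i in YAOCHU_INDICES else 0) for i in range(34)]
def kokushiCand (p : Int) : List Int :=
  (List.range 34).map (fun (i : Nat) =>
    if (i : Int) = p then 2 else if (i : Int) ∈ yaochuIndices then 1 else 0)

def is_kokushi_agari_shape_py_alt (counts : List Int) (meld_count : Int) : Bool :=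
  if meld_count ≠ 0 then false
  else
    -- any(...) over the set YAOCHU_INDICES; `any` is order-independent, so iterating the
    -- set in its literal element order is exact
    yaochuIndices.any (fun p =>
      decide (PySem.List.slice counts none (some 34) = kokushiCand p) &&
      (PySem.List.slice counts (some 34) none).all (fun c => c == 0))

-- ===== PRECONDITION & SPEC =====
def Spec_is_kokushi_agari_shape_py (counts : List Int) (meld_count : Int) (out : Bool) : Prop := out = is_kokushi_agari_shape_py_alt counts meld_count
instance (counts : List Int) (meld_count : Int) (out : Bool) : Decidable (Spec_is_kokushi_agari_shape_py counts meld_count out) := by unfold Spec_is_kokushi_agari_shape_py; infer_instance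

-- ===== CLAIM (what is proved, stated in full; the proofs are below) =====
def Claim_equal_is_kokushi_agari_shape_py : Prop := ∀ (counts : List Int) (meld_count : Int), Dom_is_kokushi_agari_shape_py counts meld_count → Spec_is_kokushi_agari_shape_py counts meld_count (is_kokushi_agari_shape_py counts meld_count)

-- ===== LEMMAS AND PROOFS =====

-- per-entry condition A's loop enforces, as a Bool
def yaoOKB (i c : Int) : Bool := if i ∈ yaochuIndices then c == 1 || c == 2 else c == 0

def validFromB : Int → List Int → Bool
  | _, [] => true
  | i, c :: t => yaoOKB i c && validFromB (i + 1) t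

def twosFrom : Int → List Int → Nat
  | _, [] => 0
  | i, c :: t => (if i ∈ yaochuIndices ∧ c = 2 then 1 else 0) + twosFrom (i + 1) t

-- number of yaochu indices in [a, b)
def ycnt (a b : Int) : Nat := (yaochuIndices.filter (fun y => decide (a ≤ y ∧ y < b))).length

theorem loop_iff (l : List Int) : ∀ (idx : Int) (pf : Bool),
    kokushiLoop (PySem.List.enumerate l idx) pf = true ↔
      (validFromB idx l = true ∧ twosFrom idx l + (if pf then 1 else 0) = 1) := by
  induction l with
  | nil =>
    intro idx pf
    cases pf <;> simp [PySem.List.enumerate_nil, kokushiLoop, validFromB, twosFrom]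
  | cons c t ih =>
    intro idx pf
    rw [PySem.List.enumerate_cons]
    by_cases hY : idx ∈ yaochuIndices
    · by_cases hc0 : c = 0
      · subst hc0
        simp [kokushiLoop, validFromB, yaoOKB, hY]
      · by_cases hc1 : c = 1
        · subst hc1
          simp [kokushiLoop, validFromB, twosFrom, yaoOKB, hY, ih]
        · by_cases hc2 : c = 2
          · subst hc2
            cases pf
            · rw [show kokushiLoop ((idx, 2) :: PySem.List.enumerate t (idx + 1)) false
                    = kokushiLoop (PySem.List.enumerate t (idx + 1)) true by
                  simp [kokushiLoop, hY], ih]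
              simp [validFromB, twosFrom, yaoOKB, hY]
            · rw [show kokushiLoop ((idx, 2) :: PySem.List.enumerate t (idx + 1)) true
                    = false by simp [kokushiLoop, hY]]
              simp [validFromB, twosFrom, yaoOKB, hY]
          · simp [kokushiLoop, validFromB, twosFrom, yaoOKB, hY, hc0, hc1, hc2]
    · by_cases hc0 : c = 0
      · subst hc0
        simp [kokushiLoop, validFromB, twosFrom, yaoOKB, hY, ih]
      · simp [kokushiLoop, validFromB, yaoOKB, hY, hc0]

theorem cnt_step_gen (L : List Int) (hN : L.Nodup) (a b : Int) (hab : a < b) :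
    (L.filter (fun y => decide (a ≤ y ∧ y < b))).length
      = (if a ∈ L then 1 else 0) + (L.filter (fun y => decide (a + 1 ≤ y ∧ y < b))).length := by
  revert hN
  induction L with
  | nil => intro _; simp
  | cons y t ih =>
    intro hN
    obtain ⟨hy, ht⟩ := List.nodup_cons.mp hN
    have H := ih ht
    by_cases hpy : a ≤ y ∧ y < b
    · by_cases hqy : a + 1 ≤ y ∧ y < b
      · rw [List.filter_cons_of_pos (by simpa using hpy),
          List.filter_cons_of_pos (by simpa using hqy)]
        have hne : ¬ a = y := by omega
        simp only [List.mem_cons, List.length_cons]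
        simp only [hne, false_or]
        by_cases hat : a ∈ t <;> simp only [hat, if_true, if_false] at H ⊢ <;> omega
      · have hay : a = y := by omega
        rw [List.filter_cons_of_pos (by simpa using hpy),
          List.filter_cons_of_neg (by simpa using hqy)]
        have hmem : a ∈ y :: t := by rw [hay]; exact List.mem_cons_self
        have hat : ¬ a ∈ t := by rw [hay]; exact hy
        simp only [List.length_cons, if_pos hmem]
        simp only [hat, if_false] at H
        omega
    · have hqy : ¬ (a + 1 ≤ y ∧ y < b) := by omega
      rw [List.filter_cons_of_neg (by simpa using hpy),
        List.filter_cons_of_neg (by simpa using hqy)]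
      have hne : ¬ a = y := by omega
      simp only [List.mem_cons, hne, false_or]
      exact H

theorem yaoOKB_cases (i c : Int) (h : yaoOKB i c = true) :
    (i ∈ yaochuIndices ∧ (c = 1 ∨ c = 2)) ∨ (i ∉ yaochuIndices ∧ c = 0) := by
  rw [yaoOKB] at h
  by_cases hY : i ∈ yaochuIndices
  · rw [if_pos hY] at h
    simp only [Bool.or_eq_true, beq_iff_eq] at h
    exact Or.inl ⟨hY, h⟩
  · rw [if_neg hY] at h
    simp only [beq_iff_eq] at h
    exact Or.inr ⟨hY, h⟩

theorem sum_of_valid (l : List Int) : ∀ idx : Int, validFromB idx l = true →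
    l.sum = (ycnt idx (idx + l.length) : Int) + twosFrom idx l := by
  induction l with
  | nil =>
    intro idx _
    have h0 : ycnt idx idx = 0 := by
      rw [ycnt, List.length_eq_zero_iff, List.filter_eq_nil_iff]
      intro y _
      simp only [decide_eq_true_eq]
      omega
    simp [twosFrom, h0]
  | cons c t ih =>
    intro idx hv
    rw [validFromB, Bool.and_eq_true] at hv
    obtain ⟨hok, hrest⟩ := hv
    have hb : idx + (((c :: t).length : Nat) : Int) = idx + 1 + (t.length : Int) := by
      simp only [List.length_cons]
      push_cast
      ring
    have hstep : ycnt idx (idx + 1 + (t.length : Int))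
        = (if idx ∈ yaochuIndices then 1 else 0) + ycnt (idx + 1) (idx + 1 + (t.length : Int)) := by
      rw [ycnt, ycnt]
      exact cnt_step_gen yaochuIndices (by decide) idx (idx + 1 + (t.length : Int)) (by omega)
    have hI := ih (idx + 1) hrest
    rw [List.sum_cons, hb, hstep, hI]
    simp only [twosFrom]
    rcases yaoOKB_cases idx c hok with ⟨hY, hc⟩ | ⟨hY, hc⟩
    · rcases hc with hc | hc <;> subst hc <;> simp only [hY, true_and, reduceIte] <;>
        push_cast <;> omega
    · subst hc
      simp only [hY, false_and, reduceIte]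
      push_cast
      omega

theorem ge_of_ycnt (n : Nat) (h : ycnt 0 n = 13) : 34 ≤ n := by
  rw [ycnt] at h
  have hall := List.length_filter_eq_length_iff.mp h
  have h33 := hall 33 (by decide)
  simp only [decide_eq_true_eq] at h33
  omega

-- twosFrom = 0 and valid forces the single-tile pattern everywhere
theorem twos_zero_pointwise (l : List Int) : ∀ idx : Int, validFromB idx l = true →
    twosFrom idx l = 0 → ∀ (k : Nat) (h : k < l.length),
      l[k] = if (idx + (k : Int)) ∈ yaochuIndices then 1 else 0 := by
  induction l with
  | nil => intro idx _ _ k hk; simp at hk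
  | cons c t ih =>
    intro idx hv h0 k hk
    rw [validFromB, Bool.and_eq_true] at hv
    obtain ⟨hok, hrest⟩ := hv
    rw [twosFrom] at h0
    have hni : ¬ (idx ∈ yaochuIndices ∧ c = 2) := by
      intro h; rw [if_pos h] at h0; omega
    have ht0 : twosFrom (idx + 1) t = 0 := by
      by_cases h : idx ∈ yaochuIndices ∧ c = 2
      · exact absurd h hni
      · rw [if_neg h] at h0; omega
    cases k with
    | zero =>
      simp only [List.getElem_cons_zero, Int.natCast_zero, add_zero]
      rcases yaoOKB_cases idx c hok with ⟨hY, hc⟩ | ⟨hY, hc⟩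
      · rcases hc with hc | hc
        · rw [if_pos hY]; exact hc
        · exact absurd ⟨hY, hc⟩ hni
      · rw [if_neg hY]; exact hc
    | succ k =>
      have h := ih (idx + 1) hrest ht0 k (by simpa using hk)
      have harg : idx + 1 + (k : Int) = idx + (((k + 1 : Nat) : Int)) := by push_cast; ring
      rw [harg] at h
      simpa using h

-- twosFrom = 1 and valid forces the candidate pattern with its pair at some yaochu index p
theorem counts_eq_cand (l : List Int) : ∀ idx : Int, validFromB idx l = true →
    twosFrom idx l = 1 → ∃ p : Int, idx ≤ p ∧ p ∈ yaochuIndices ∧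
      ∀ (k : Nat) (h : k < l.length),
        l[k] = if (idx + (k : Int)) = p then 2
               else if (idx + (k : Int)) ∈ yaochuIndices then 1 else 0 := by
  induction l with
  | nil => intro idx _ h1; simp [twosFrom] at h1
  | cons c t ih =>
    intro idx hv h1
    rw [validFromB, Bool.and_eq_true] at hv
    obtain ⟨hok, hrest⟩ := hv
    rw [twosFrom] at h1
    by_cases hI : idx ∈ yaochuIndices ∧ c = 2
    · rw [if_pos hI] at h1
      have ht0 : twosFrom (idx + 1) t = 0 := by omega
      refine ⟨idx, le_refl idx, hI.1, ?_⟩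
      intro k hk
      cases k with
      | zero => simp [hI.2]
      | succ k =>
        have h := twos_zero_pointwise t (idx + 1) hrest ht0 k (by simpa using hk)
        have harg : idx + 1 + (k : Int) = idx + (((k + 1 : Nat) : Int)) := by push_cast; ring
        rw [harg] at h
        have hne : ¬ (idx + (((k + 1 : Nat) : Int)) = idx) := by push_cast; omega
        rw [List.getElem_cons_succ, h, if_neg hne]
    · rw [if_neg hI] at h1
      obtain ⟨p, hp1, hp2, hp3⟩ := ih (idx + 1) hrest (by omega)
      refine ⟨p, by omega, hp2, ?_⟩
      intro k hk
      cases k with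
      | zero =>
        have hne : ¬ (idx + ((0 : Nat) : Int) = p) := by push_cast; omega
        rw [List.getElem_cons_zero, if_neg hne]
        rcases yaoOKB_cases idx c hok with ⟨hY, hc⟩ | ⟨hY, hc⟩
        · rcases hc with hc | hc
          · simp only [Int.natCast_zero, add_zero, if_pos hY]; exact hc
          · exact absurd ⟨hY, hc⟩ hI
        · simp only [Int.natCast_zero, add_zero, if_neg hY]; exact hc
      | succ k =>
        have h := hp3 k (by simpa using hk)
        have harg : idx + 1 + (k : Int) = idx + (((k + 1 : Nat) : Int)) := by push_cast; ring
        rw [harg] at h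
        simpa using h

theorem cand_length (p : Int) : (kokushiCand p).length = 34 := by simp [kokushiCand]

theorem cand_getElem (p : Int) (k : Nat) (h : k < (kokushiCand p).length) :
    (kokushiCand p)[k] = if (k : Int) = p then 2
      else if (k : Int) ∈ yaochuIndices then 1 else 0 := by
  simp [kokushiCand]

-- each of the 13 candidate hands is a valid kokushi pattern with one pair and 14 tiles
theorem cand_props : ∀ p ∈ yaochuIndices,
    validFromB 0 (kokushiCand p) = true ∧ twosFrom 0 (kokushiCand p) = 1 ∧
      (kokushiCand p).sum = 14 := by decide

theorem validFromB_append (l : List Int) : ∀ (r : List Int) (idx : Int),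
    validFromB idx (l ++ r) = (validFromB idx l && validFromB (idx + l.length) r) := by
  induction l with
  | nil => intro r idx; simp [validFromB]
  | cons c t ih =>
    intro r idx
    have harg : idx + (((c :: t).length : Nat) : Int) = idx + 1 + (t.length : Int) := by
      simp only [List.length_cons]; push_cast; ring
    rw [List.cons_append, validFromB, validFromB, ih, harg, Bool.and_assoc]

theorem twosFrom_append (l : List Int) : ∀ (r : List Int) (idx : Int),
    twosFrom idx (l ++ r) = twosFrom idx l + twosFrom (idx + l.length) r := by
  induction l with
  | nil => intro r idx; simp [twosFrom]
  | cons c t ih =>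
    intro r idx
    have harg : idx + (((c :: t).length : Nat) : Int) = idx + 1 + (t.length : Int) := by
      simp only [List.length_cons]; push_cast; ring
    rw [List.cons_append, twosFrom, twosFrom, ih, harg]
    omega

theorem validFromB_ge34 (r : List Int) : ∀ idx : Int, 34 ≤ idx → (∀ c ∈ r, c = 0) →
    validFromB idx r = true := by
  induction r with
  | nil => intro idx _ _; rfl
  | cons c t ih =>
    intro idx hidx hz
    have h34 : ∀ z ∈ yaochuIndices, 0 ≤ z ∧ z < 34 := by decide
    have hY : idx ∉ yaochuIndices := fun h => by have := h34 idx h; omega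
    rw [validFromB, yaoOKB, if_neg hY, Bool.and_eq_true]
    exact ⟨by simpa using hz c List.mem_cons_self,
      ih (idx + 1) (by omega) (fun x hx => hz x (List.mem_cons_of_mem c hx))⟩

theorem twosFrom_ge34 (r : List Int) : ∀ idx : Int, 34 ≤ idx → twosFrom idx r = 0 := by
  induction r with
  | nil => intro idx _; rfl
  | cons c t ih =>
    intro idx hidx
    have h34 : ∀ z ∈ yaochuIndices, 0 ≤ z ∧ z < 34 := by decide
    have hY : idx ∉ yaochuIndices := fun h => by have := h34 idx h; omega
    rw [twosFrom, if_neg (fun h => hY h.1), ih (idx + 1) (by omega)]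

-- the bridge: B's candidate search succeeds exactly when A's loop condition plus sum hold
theorem bridge (counts : List Int) :
    (yaochuIndices.any (fun p =>
        decide (PySem.List.slice counts none (some 34) = kokushiCand p) &&
        (PySem.List.slice counts (some 34) none).all (fun c => c == 0))) = true ↔
      (validFromB 0 counts = true ∧ twosFrom 0 counts = 1 ∧ counts.sum = 14) := by
  have hto : PySem.List.slice counts none (some 34) = counts.take 34 := by
    have h := PySem.List.slice_to_natCast (xs := counts) (b := 34)
    norm_num at h
    exact h
  have hfrom : PySem.List.slice counts (some 34) none = counts.drop 34 := by
    have h := PySem.List.slice_from_natCast (xs := counts) (a := 34)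
    norm_num at h
    exact h
  rw [List.any_eq_true]
  simp only [hto, hfrom, Bool.and_eq_true, decide_eq_true_eq, List.all_eq_true, beq_iff_eq]
  constructor
  · rintro ⟨p, hp, htake, hdrop⟩
    have hlen : 34 ≤ counts.length := by
      have := congrArg List.length htake
      rw [List.length_take, cand_length] at this
      omega
    obtain ⟨hv, ht, hs⟩ := cand_props p hp
    have hsplit : counts = counts.take 34 ++ counts.drop 34 := (List.take_append_drop 34 counts).symm
    have hlt : (counts.take 34).length = 34 := by rw [List.length_take]; omega
    refine ⟨?_, ?_, ?_⟩
    · rw [hsplit, validFromB_append, Bool.and_eq_true, htake]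
      refine ⟨hv, ?_⟩
      rw [cand_length]
      exact validFromB_ge34 _ _ (by norm_num) hdrop
    · rw [hsplit, twosFrom_append, htake, cand_length, ht]
      have hz := twosFrom_ge34 (counts.drop 34) (0 + ((34 : Nat) : Int)) (by norm_num)
      omega
    · rw [hsplit, List.sum_append, htake, hs, List.sum_eq_zero hdrop]
      norm_num
  · rintro ⟨hv, ht, hs⟩
    have hsum := sum_of_valid counts 0 hv
    rw [zero_add] at hsum
    have h13 : ycnt 0 (counts.length : Int) = 13 := by omega
    have hlen : 34 ≤ counts.length := ge_of_ycnt _ h13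
    obtain ⟨p, -, hp, hpt⟩ := counts_eq_cand counts 0 hv ht
    have h34 : ∀ z ∈ yaochuIndices, 0 ≤ z ∧ z < 34 := by decide
    have hp34 : p < 34 := (h34 p hp).2
    refine ⟨p, hp, ?_, ?_⟩
    · apply List.ext_getElem
      · rw [List.length_take, cand_length]; omega
      · intro k hk1 hk2
        rw [List.length_take] at hk1
        have hk34 : k < 34 := by omega
        have hkc : k < counts.length := by omega
        rw [List.getElem_take, cand_getElem]
        have h := hpt k hkc
        simpa using h
    · intro c hc
      obtain ⟨j, hj, hcj⟩ := List.mem_iff_getElem.mp hc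
      rw [List.getElem_drop] at hcj
      have hkc : 34 + j < counts.length := by rw [List.length_drop] at hj; omega
      have h := hpt (34 + j) hkc
      have hne : ¬ ((0 : Int) + ((34 + j : Nat) : Int) = p) := by push_cast; omega
      have hnm : ((0 : Int) + ((34 + j : Nat) : Int)) ∉ yaochuIndices := by
        intro hmem; have := (h34 _ hmem).2; push_cast at this; omega
      rw [if_neg hne, if_neg hnm] at h
      rw [← hcj, h]

-- ===== VERDICT (by name: the statement is the Claim_ definition above) =====
theorem is_kokushi_agari_shape_py_spec : Claim_equal_is_kokushi_agari_shape_py := by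
  intro counts meld_count _
  unfold Spec_is_kokushi_agari_shape_py is_kokushi_agari_shape_py is_kokushi_agari_shape_py_alt
  by_cases hm : meld_count = 0
  · subst hm
    rw [if_neg (show ¬(0 : Int) ≠ 0 by simp), if_neg (show ¬(0 : Int) ≠ 0 by simp)]
    by_cases hs : counts.sum = 14
    · rw [if_neg (show ¬counts.sum ≠ 14 by simp [hs])]
      rw [Bool.eq_iff_iff, loop_iff, bridge]
      constructor
      · rintro ⟨h1, h2⟩
        exact ⟨h1, by simpa using h2, hs⟩
      · rintro ⟨h1, h2, -⟩
        exact ⟨h1, by simpa using h2⟩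
    · rw [if_pos (show counts.sum ≠ 14 from hs)]
      cases hb : yaochuIndices.any (fun p =>
          decide (PySem.List.slice counts none (some 34) = kokushiCand p) &&
          (PySem.List.slice counts (some 34) none).all (fun c => c == 0)) with
      | false => rfl
      | true => exact absurd ((bridge counts).mp hb).2.2 hs
  · rw [if_pos hm, if_pos hm]
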